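-- pv_equiv track=rewrite | github.com/MrBrantCode/unitest_baseline | mut_generate/mist_train_cf/cf_20167/solution.py | find_max_prime_difference
-- ===== SOURCE A (Python) =====
-- import math
--
-- def is_prime(n):
--     if n < 2:
--         return False
--     for i in range(2, int(math.sqrt(n)) + 1):
--         if n % i == 0:
--             return False
--     return True
--
-- def find_max_prime_difference(arr):
--     primes = [num for num in arr if is_prime(num)]
--     max_diff = 0
--     prime_1 = None
--     prime_2 = None
--
--     for i in range(len(primes)):
--         for j in range(i + 1, len(primes)):
--             diff = primes[j] - primes[i]
--             if diff > max_diff: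
--                 max_diff = diff
--                 prime_1 = primes[i]
--                 prime_2 = primes[j]
--
--     return max_diff, prime_1, prime_2
-- ===== SOURCE B (Python) =====
-- import math
--
-- def _is_prime(n):
--     if n < 2:
--         return False
--     for i in range(2, int(math.sqrt(n)) + 1):
--         if n % i == 0:
--             return False
--     return True
--
-- def find_max_prime_difference(arr):
--     # single pass over the primes: track the running minimum prime and the best
--     # positive (later - earlier) difference seen so far
--     primes = [num for num in arr if _is_prime(num)]
--     best = 0
--     p1 = None
--     p2 = None
--     mn = None
--     for p in primes:
--         if mn is None:
--             mn = p
--             continue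
--         d = p - mn
--         if d > best:
--             best = d
--             p1 = mn
--             p2 = p
--         if p < mn:
--             mn = p
--     return best, p1, p2
-- ===== Notes on version B (the rewrite author's own statement) =====
-- stated objective: alternative
-- what changed: The scan over all ordered prime pairs is replaced by a single pass over the primes that tracks the running minimum and the best positive (later - earlier) difference (buy/sell style); the primality filter is unchanged.
import Mathlib
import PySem

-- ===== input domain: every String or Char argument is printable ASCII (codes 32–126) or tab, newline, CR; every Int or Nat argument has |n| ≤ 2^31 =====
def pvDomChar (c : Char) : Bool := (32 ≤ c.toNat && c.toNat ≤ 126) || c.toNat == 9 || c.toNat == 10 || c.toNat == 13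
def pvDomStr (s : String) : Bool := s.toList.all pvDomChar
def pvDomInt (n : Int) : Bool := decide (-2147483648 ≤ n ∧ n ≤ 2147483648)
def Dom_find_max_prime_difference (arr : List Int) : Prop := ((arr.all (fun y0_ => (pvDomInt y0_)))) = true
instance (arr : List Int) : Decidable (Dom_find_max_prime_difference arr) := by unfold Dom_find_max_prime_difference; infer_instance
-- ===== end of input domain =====

-- B replaces A's quadratic scan over all prime pairs by a single pass tracking the running
-- minimum prime and the best positive (later - earlier) difference; same primality filter.

-- ===== PORT A =====
-- is_prime: 'int(math.sqrt(n))' is ported as Int.sqrt, which is exact for the 0 ≤ n ≤ 2^31 it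
-- is reached with (n < 2 returns early); the loop's early 'return False' is rendered as .all.
def pvIsPrimeA (n : Int) : Bool :=
  if n < 2 then false
  else (PySem.List.pyRange 2 (Int.sqrt n + 1) 1).all (fun i => !(PySem.Int.mod n i == 0))

-- the body of the 'if diff > max_diff' update, shared by both index loops' transliteration
def pvStep (x : Int) (st : Int × Option Int × Option Int) (y : Int) : Int × Option Int × Option Int :=
  if y - x > st.1 then (y - x, some x, some y) else st

def find_max_prime_difference (arr : List Int) : List (Option Int) :=
  let primes := arr.filter pvIsPrimeA
  let st :=
    (PySem.List.pyRange 0 (primes.length : Int) 1).foldl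
      (fun st i =>
        (PySem.List.pyRange (i + 1) (primes.length : Int) 1).foldl
          (fun st j => pvStep (PySem.List.pyGetD primes i 0) st (PySem.List.pyGetD primes j 0)) st)
      ((0 : Int), (none : Option Int), (none : Option Int))
  [some st.1, st.2.1, st.2.2]

-- ===== PORT B =====
-- _is_prime: 'math.isqrt(n)' ported as Int.sqrt (exact, n ≥ 2 here)
def pvIsPrimeB (n : Int) : Bool :=
  if n < 2 then false
  else (PySem.List.pyRange 2 (Int.sqrt n + 1) 1).all (fun i => !(PySem.Int.mod n i == 0))

-- one step of B's single pass: state = (running min, best, p1, p2)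
def pvStepB (st : Option Int × Int × Option Int × Option Int) (p : Int) :
    Option Int × Int × Option Int × Option Int :=
  match st with
  | (none, b, p1, p2) => (some p, b, p1, p2)
  | (some m, b, p1, p2) =>
    let t := if p - m > b then (p - m, some m, some p) else (b, p1, p2)
    (some (if p < m then p else m), t)

def find_max_prime_difference_alt (arr : List Int) : List (Option Int) :=
  let primes := arr.filter pvIsPrimeB
  let st := primes.foldl pvStepB ((none : Option Int), (0 : Int), (none : Option Int), (none : Option Int))
  [some st.2.1, st.2.2.1, st.2.2.2]

-- ===== PRECONDITION & SPEC =====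
def Spec_find_max_prime_difference (arr : List Int) (out : List (Option Int)) : Prop := out = find_max_prime_difference_alt arr
instance (arr : List Int) (out : List (Option Int)) : Decidable (Spec_find_max_prime_difference arr out) := by unfold Spec_find_max_prime_difference; infer_instance

-- ===== CLAIM (what is proved, stated in full; the proofs are below) =====
def Claim_equal_find_max_prime_difference : Prop := ∀ (arr : List Int), Dom_find_max_prime_difference arr → Spec_find_max_prime_difference arr (find_max_prime_difference arr)

-- ===== LEMMAS AND PROOFS =====

-- A's inner loop over the suffix after position i, as a fold over the list itself
def pvInner (x : Int) (R : List Int) (st : Int × Option Int × Option Int) :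
    Int × Option Int × Option Int :=
  R.foldl (fun st y => pvStep x st y) st

-- A's outer loop, as structural recursion on suffixes
def pvOuter : List Int → (Int × Option Int × Option Int) → Int × Option Int × Option Int
  | [], st => st
  | x :: R, st => pvOuter R (pvInner x R st)



theorem pvIsPrime_eq : pvIsPrimeA = pvIsPrimeB := rfl

theorem foldl_max_init (l : List Int) : ∀ a b : Int, l.foldl max (max a b) = max a (l.foldl max b) := by
  induction l with
  | nil => intro a b; rfl
  | cons z t ih =>
    intro a b
    simp only [List.foldl_cons]
    rw [max_assoc, ih]

-- closed form of the inner pass: only the maximum of the scanned suffix matters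
theorem pvInner_char (x : Int) :
    ∀ (R : List Int) (y b : Int) (p q : Option Int),
      pvInner x R (pvStep x (b, p, q) y) =
        (if R.foldl max y - x > b then (R.foldl max y - x, some x, some (R.foldl max y)) else (b, p, q)) := by
  intro R
  induction R with
  | nil =>
    intro y b p q
    simp [pvInner, pvStep]
  | cons z R' ih =>
    intro y b p q
    show pvInner x R' (pvStep x (pvStep x (b, p, q) y) z) = _
    simp only [List.foldl_cons, foldl_max_init]
    by_cases h1 : y - x > b
    · rw [show pvStep x (b, p, q) y = (y - x, some x, some y) from if_pos h1]
      rw [ih z (y - x) (some x) (some y)]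
      by_cases h2 : R'.foldl max z - x > y - x
      · rw [if_pos h2, if_pos (by have := le_max_right y (R'.foldl max z); omega)]
        rw [max_eq_right (show y ≤ R'.foldl max z by omega)]
      · rw [if_neg h2, max_eq_left (show R'.foldl max z ≤ y by omega), if_pos h1]
    · rw [show pvStep x (b, p, q) y = (b, p, q) from if_neg h1]
      rw [ih z b p q]
      by_cases h2 : R'.foldl max z - x > b
      · rw [if_pos h2, max_eq_right (show y ≤ R'.foldl max z by omega), if_pos h2]
      · rw [if_neg h2]
        have hle : max y (R'.foldl max z) - x ≤ b := by
          have := max_le (show y ≤ x + b by omega) (show R'.foldl max z ≤ x + b by omega)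
          omega
        rw [if_neg (by omega)]

theorem pvInner_cons_char (c y : Int) (R' : List Int) (b : Int) (p q : Option Int) :
    pvInner c (y :: R') (b, p, q) =
      (if R'.foldl max y - c > b then (R'.foldl max y - c, some c, some (R'.foldl max y)) else (b, p, q)) := by
  show pvInner c R' (pvStep c (b, p, q) y) = _
  rw [pvInner_char]

-- two successive inner passes with x and m collapse to one pass with min m x
theorem pvInner_merge (R : List Int) (x m : Int) (st : Int × Option Int × Option Int) :
    pvInner x R (pvInner m R st) = pvInner (if x < m then x else m) R st := by
  cases R with
  | nil => rfl
  | cons y R' =>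
    obtain ⟨b, p, q⟩ := st
    rw [pvInner_cons_char m y R' b p q]
    by_cases h1 : R'.foldl max y - m > b
    · rw [if_pos h1, pvInner_cons_char x y R', pvInner_cons_char (if x < m then x else m) y R' b p q]
      split_ifs <;> first | rfl | (exfalso; omega)
    · rw [if_neg h1, pvInner_cons_char x y R' b p q,
          pvInner_cons_char (if x < m then x else m) y R' b p q]
      split_ifs <;> first | rfl | (exfalso; omega)

-- B's pass from a seeded minimum equals A's outer recursion after the pass for m
theorem pvFoldB_eq_pvOuter :
    ∀ (R : List Int) (m : Int) (b : Int) (p q : Option Int),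
      (R.foldl pvStepB (some m, b, p, q)).2 = pvOuter R (pvInner m R (b, p, q)) := by
  intro R
  induction R with
  | nil => intro m b p q; rfl
  | cons x R' ih =>
    intro m b p q
    have hstep : pvStepB (some m, b, p, q) x
        = (some (if x < m then x else m), pvStep m (b, p, q) x) := rfl
    have hA : pvOuter (x :: R') (pvInner m (x :: R') (b, p, q))
        = pvOuter R' (pvInner x R' (pvInner m R' (pvStep m (b, p, q) x))) := rfl
    rw [List.foldl_cons, hstep, hA]
    rcases h : pvStep m (b, p, q) x with ⟨b', p', q'⟩
    rw [ih, pvInner_merge]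

-- A's index loops equal the suffix recursion pvOuter
theorem pvIndex_eq_pvOuter (P : List Int) :
    ∀ (k : Nat) (st : Int × Option Int × Option Int),
      (PySem.List.pyRange (k : Int) (P.length : Int) 1).foldl
        (fun st i =>
          (PySem.List.pyRange (i + 1) (P.length : Int) 1).foldl
            (fun st j => pvStep (PySem.List.pyGetD P i 0) st (PySem.List.pyGetD P j 0)) st)
        st = pvOuter (P.drop k) st := by
  intro k
  induction hfuel : P.length - k generalizing k with
  | zero =>
    intro st
    have hk : (P.length : Int) ≤ (k : Int) := by omega
    rw [PySem.List.pyRange_one_eq_nil hk, List.drop_eq_nil_of_le (by omega)]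
    rfl
  | succ f ihf =>
    intro st
    have hk : k < P.length := by omega
    rw [PySem.List.pyRange_one_cons (by exact_mod_cast hk), List.foldl_cons]
    have hcast : ((k : Int) + 1) = ((k + 1 : Nat) : Int) := by push_cast; ring
    have hinner :
        (PySem.List.pyRange ((k : Int) + 1) (P.length : Int) 1).foldl
          (fun st j => pvStep (PySem.List.pyGetD P (k : Int) 0) st (PySem.List.pyGetD P j 0)) st
        = pvInner (PySem.List.pyGetD P (k : Int) 0) (P.drop (k + 1)) st := by
      have := PySem.List.foldl_pyRange_pyGetD' P 0
        (fun st y => pvStep (PySem.List.pyGetD P (k : Int) 0) st y) st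
        (a := (k : Int) + 1) (by omega)
      rw [show (((k : Int) + 1)).toNat = k + 1 by omega] at this
      exact this
    rw [hinner, hcast, ihf (k + 1) (by omega)]
    have hget : PySem.List.pyGetD P (k : Int) 0 = P[k] := by
      rw [PySem.List.pyGetD_natCast, List.getD_eq_getElem?_getD, List.getElem?_eq_getElem hk]
      rfl
    rw [List.drop_eq_getElem_cons hk, hget]
    rfl

-- ===== VERDICT (by name: the statement is the Claim_ definition above) =====
theorem find_max_prime_difference_spec : Claim_equal_find_max_prime_difference := by
  intro arr _
  unfold Spec_find_max_prime_difference
  unfold find_max_prime_difference find_max_prime_difference_alt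
  rw [pvIsPrime_eq]
  simp only []
  have h0 := pvIndex_eq_pvOuter (arr.filter pvIsPrimeB) 0 ((0 : Int), (none : Option Int), (none : Option Int))
  simp only [Nat.cast_zero, List.drop_zero] at h0
  rw [h0]
  cases h : arr.filter pvIsPrimeB with
  | nil => rfl
  | cons x R =>
    rw [List.foldl_cons]
    have hs : pvStepB ((none : Option Int), (0 : Int), (none : Option Int), (none : Option Int)) x
        = (some x, 0, none, none) := rfl
    rw [hs, pvFoldB_eq_pvOuter]
    rfl
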